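-- pv_equiv track=rewrite | github.com/ADITYADAS1999/Python-ProjectX | Normal-Text-Encryption-Decryption_python_app/triangulation_encryption_8_bit_binary.py | triangular_encrypt
-- ===== SOURCE A (Python) =====
-- def triangular_encrypt(bit_stream):
--     blocks = [bit_stream]  # Adjusted to work on an 8-bit input
--     encrypted_blocks = []
--     for block in blocks:
--         triangle = [block]
--         while len(triangle[-1]) > 1:
--             new_level = ''.join(str(xnor(int(triangle[-1][i]), int(triangle[-1][i+1]))) for i in range(len(triangle[-1])-1))
--             triangle.append(new_level)
--
--         # Forming the target block from the triangle (example: using MSBs)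
--         target_block = ''.join(level[0] for level in triangle)
--         encrypted_blocks.append(target_block)
--
--     # Combine all encrypted blocks
--     encrypted_bit_stream = ''.join(encrypted_blocks)
--     return encrypted_bit_stream
--
-- def xnor(a, b):
--     return ~(a ^ b) & 1
-- ===== SOURCE B (Python) =====
-- def xnor(a, b):
--     return ~(a ^ b) & 1
--
--
-- def triangular_encrypt(bit_stream):
--     # Closed-form diagonal: out[k] for k>=1 is a Pascal-mod-2 (Lucas) xor-combination
--     # of the level-1 xnor bits, with an affine offset of 1 for k>=2; no triangle is built.
--     n = len(bit_stream)
--     out = [bit_stream[0]]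
--     level1 = [xnor(int(bit_stream[i]), int(bit_stream[i + 1])) for i in range(n - 1)]
--     row = [1]  # Pascal row mod 2: row[j] = C(k-1, j) & 1
--     for k in range(1, n):
--         b = 0
--         for r, x in zip(row, level1):
--             b ^= r & x
--         if k >= 2:
--             b ^= 1
--         out.append(str(b))
--         row = [a ^ c for a, c in zip([0] + row, row + [0])]
--     return ''.join(out)
-- ===== Notes on version B (the rewrite author's own statement) =====
-- stated objective: alternative
-- what changed: Instead of materialising the whole XNOR triangle level by level and joining its first characters, B computes each diagonal bit directly as a Pascal-row-mod-2 (Lucas) xor-combination of the single level-1 bit string, with an affine +1 offset for rows k>=2.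
import Mathlib
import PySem

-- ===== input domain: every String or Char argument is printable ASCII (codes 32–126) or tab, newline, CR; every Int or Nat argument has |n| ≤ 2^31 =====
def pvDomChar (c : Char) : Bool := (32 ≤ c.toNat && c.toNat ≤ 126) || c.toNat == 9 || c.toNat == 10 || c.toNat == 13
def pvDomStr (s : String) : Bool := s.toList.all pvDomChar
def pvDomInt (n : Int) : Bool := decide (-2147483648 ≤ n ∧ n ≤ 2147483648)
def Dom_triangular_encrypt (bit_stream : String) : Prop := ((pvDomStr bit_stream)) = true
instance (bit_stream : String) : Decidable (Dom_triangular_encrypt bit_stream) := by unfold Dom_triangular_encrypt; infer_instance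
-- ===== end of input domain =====

-- B replaces A's full XNOR triangle by a one-pass Pascal-mod-2 (Lucas) closed form for the
-- triangle's left diagonal; same return value on Pre_, structurally different algorithm.

-- ===== PORT A =====

-- int(ch) for a one-character string; exact on Pre_ (all chars are ASCII digits there)
def pyIntChar (c : Char) : Int := (c.toNat : Int) - 48

-- xnor(a, b) = ~(a ^ b) & 1
def xnorI (a b : Int) : Int := PySem.Int.band (Int.not (PySem.Int.bxor a b)) 1

-- new_level = ''.join(str(xnor(int(lvl[i]), int(lvl[i+1]))) for i in range(len(lvl)-1))
def newLevelA : List Char → List Char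
  | a :: b :: t => (PySem.Int.toStr (xnorI (pyIntChar a) (pyIntChar b))).toList ++ newLevelA (b :: t)
  | _ => []

-- while len(triangle[-1]) > 1: append new level.  Fuel = initial length is enough, since
-- each new level is one element shorter; the fuel only makes the recursion structural.
def buildTriangleA : Nat → List Char → List (List Char)
  | 0, cur => [cur]
  | f + 1, cur => if cur.length > 1 then cur :: buildTriangleA f (newLevelA cur) else [cur]

-- ''.join(level[0] for level in triangle); level[0] raises only on the empty input (outside Pre_)
def triangular_encrypt (bit_stream : String) : String :=
  String.mk ((buildTriangleA bit_stream.toList.length bit_stream.toList).filterMap List.head?)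

-- ===== PORT B =====

-- level1 = [xnor(int(s[i]), int(s[i+1])) for i in range(n-1)]
def buildL1 : List Char → List Int
  | a :: b :: t => xnorI (pyIntChar a) (pyIntChar b) :: buildL1 (b :: t)
  | _ => []

-- one iteration of B's loop body: state = (out, row), k the loop variable
def bStep (l1 : List Int) (st : List Char × List Int) (k : Int) : List Char × List Int :=
  let b0 := (st.2.zip l1).foldl (fun b rx => PySem.Int.bxor b (PySem.Int.band rx.1 rx.2)) 0
  let b1 := if 2 ≤ k then PySem.Int.bxor b0 1 else b0
  (st.1 ++ (PySem.Int.toStr b1).toList,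
   ((0 :: st.2).zip (st.2 ++ [0])).map (fun p => PySem.Int.bxor p.1 p.2))

def triangular_encrypt_alt (bit_stream : String) : String :=
  match bit_stream.toList with
  | [] => ""   -- bit_stream[0] raises IndexError on the empty input (outside Pre_)
  | c :: rest =>
    let l1 := buildL1 (c :: rest)
    let n : Int := ((c :: rest).length : Int)
    String.mk ((PySem.List.pyRange 1 n 1).foldl (bStep l1) ([c], [1])).1

-- ===== PRECONDITION & SPEC =====
-- Python A raises IndexError on the empty input and ValueError (int(ch)) when some char is not a digit
-- and the length is ≥ 2; Pre_ excludes exactly those inputs.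
def Pre_triangular_encrypt (bit_stream : String) : Prop :=
  bit_stream.toList ≠ [] ∧
    (bit_stream.toList.length = 1 ∨
      bit_stream.toList.all (fun c => decide ('0' ≤ c ∧ c ≤ '9')) = true)
instance (bit_stream : String) : Decidable (Pre_triangular_encrypt bit_stream) := by
  unfold Pre_triangular_encrypt; infer_instance

def pvWitness_triangular_encrypt : String := "01"

def Spec_triangular_encrypt (bit_stream : String) (out : String) : Prop := out = triangular_encrypt_alt bit_stream
instance (bit_stream : String) (out : String) : Decidable (Spec_triangular_encrypt bit_stream out) := by unfold Spec_triangular_encrypt; infer_instance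

-- ===== CLAIM (what is proved, stated in full; the proofs are below) =====
def Claim_equal_triangular_encrypt : Prop := ∀ (bit_stream : String), Dom_triangular_encrypt bit_stream → Pre_triangular_encrypt bit_stream → Spec_triangular_encrypt bit_stream (triangular_encrypt bit_stream)

-- ===== LEMMAS AND PROOFS =====

def IsBit (x : Int) : Prop := x = 0 ∨ x = 1

def IsBits (l : List Int) : Prop := ∀ x ∈ l, IsBit x

def bitChar (x : Int) : Char := if x = 1 then '1' else '0'

-- pairwise xor / xnor of adjacent elements
def stepX : List Int → List Int
  | a :: b :: t => PySem.Int.bxor a b :: stepX (b :: t)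
  | _ => []

def stepN : List Int → List Int
  | a :: b :: t => xnorI a b :: stepN (b :: t)
  | _ => []

def powX : Nat → List Int → List Int
  | 0, l => l
  | m + 1, l => powX m (stepX l)

def powN : Nat → List Int → List Int
  | 0, l => l
  | m + 1, l => powN m (stepN l)

def dotI : List Int → List Int → Int
  | r :: rs, x :: xs => PySem.Int.bxor (PySem.Int.band r x) (dotI rs xs)
  | _, _ => 0

def nxt' : Int → List Int → List Int
  | p, [] => [p]
  | p, r :: rs => PySem.Int.bxor p r :: nxt' r rs

def prow : Nat → List Int
  | 0 => [1]
  | m + 1 => nxt' 0 (prow m)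

def bitOf (l1 : List Int) (k : Nat) : Int :=
  if 2 ≤ k then PySem.Int.bxor (dotI (prow (k - 1)) l1) 1 else dotI (prow (k - 1)) l1

theorem xnorI_isBit (a b : Int) : IsBit (xnorI a b) := by
  unfold IsBit xnorI
  rw [PySem.Int.band_one]
  have h1 := PySem.Int.mod_nonneg (Int.not (PySem.Int.bxor a b)) (b := 2) (by omega)
  have h2 := PySem.Int.mod_lt (Int.not (PySem.Int.bxor a b)) (b := 2) (by omega)
  omega

theorem buildL1_isBits (l : List Char) : IsBits (buildL1 l) := by
  induction l with
  | nil => intro x hx; cases hx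
  | cons a t ih =>
    cases t with
    | nil => intro x hx; cases hx
    | cons b t' =>
      intro x hx
      rcases List.mem_cons.1 hx with hx | hx
      · exact hx ▸ xnorI_isBit _ _
      · exact ih x hx

theorem buildL1_length (l : List Char) : (buildL1 l).length = l.length - 1 := by
  induction l with
  | nil => rfl
  | cons a t ih =>
    cases t with
    | nil => rfl
    | cons b t' => simp [buildL1] at ih ⊢; omega

theorem toStr_bit (x : Int) (h : IsBit x) : (PySem.Int.toStr x).toList = [bitChar x] := by
  rcases h with h | h <;> subst h <;> decide

theorem pyIntChar_bitChar (x : Int) (h : IsBit x) : pyIntChar (bitChar x) = x := by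
  rcases h with h | h <;> subst h <;> decide

theorem newLevelA_eq (l : List Char) : newLevelA l = (buildL1 l).map bitChar := by
  induction l with
  | nil => rfl
  | cons a t ih =>
    cases t with
    | nil => rfl
    | cons b t' =>
      simp only [newLevelA, buildL1, List.map_cons]
      rw [toStr_bit _ (xnorI_isBit _ _)]
      simpa using ih

theorem buildL1_map_bitChar (bits : List Int) (h : IsBits bits) :
    buildL1 (bits.map bitChar) = stepN bits := by
  induction bits with
  | nil => rfl
  | cons a t ih =>
    cases t with
    | nil => rfl
    | cons b t' =>
      simp only [List.map_cons, buildL1, stepN]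
      congr 1
      · rw [pyIntChar_bitChar a (h a (by simp)), pyIntChar_bitChar b (h b (by simp))]
      · rw [← List.map_cons]
        exact ih (fun x hx => h x (List.mem_cons_of_mem _ hx))

theorem stepX_isBits (l : List Int) (h : IsBits l) : IsBits (stepX l) := by
  induction l with
  | nil => intro x hx; cases hx
  | cons a t ih =>
    cases t with
    | nil => intro x hx; cases hx
    | cons b t' =>
      intro x hx
      rcases List.mem_cons.1 hx with hx | hx
      · subst hx
        rcases h a (by simp) with ha | ha <;> rcases h b (by simp) with hb | hb <;>
          subst ha <;> subst hb <;> first | exact Or.inl (by decide) | exact Or.inr (by decide)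
      · exact ih (fun y hy => h y (List.mem_cons_of_mem _ hy)) x hx

theorem stepN_isBits (l : List Int) (h : IsBits l) : IsBits (stepN l) := by
  induction l with
  | nil => intro x hx; cases hx
  | cons a t ih =>
    cases t with
    | nil => intro x hx; cases hx
    | cons b t' =>
      intro x hx
      rcases List.mem_cons.1 hx with hx | hx
      · exact hx ▸ xnorI_isBit _ _
      · exact ih (fun y hy => h y (List.mem_cons_of_mem _ hy)) x hx

theorem stepX_length (l : List Int) : (stepX l).length = l.length - 1 := by
  induction l with
  | nil => rfl
  | cons a t ih =>
    cases t with
    | nil => rfl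
    | cons b t' => simp [stepX] at ih ⊢; omega

theorem stepN_length (l : List Int) : (stepN l).length = l.length - 1 := by
  induction l with
  | nil => rfl
  | cons a t ih =>
    cases t with
    | nil => rfl
    | cons b t' => simp [stepN] at ih ⊢; omega

theorem stepN_eq_mapX (l : List Int) (h : IsBits l) :
    stepN l = (stepX l).map (fun x => PySem.Int.bxor 1 x) := by
  induction l with
  | nil => rfl
  | cons a t ih =>
    cases t with
    | nil => rfl
    | cons b t' =>
      simp only [stepN, stepX, List.map_cons]
      congr 1
      · rcases h a (by simp) with ha | ha <;> rcases h b (by simp) with hb | hb <;>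
          subst ha <;> subst hb <;> decide
      · exact ih (fun y hy => h y (List.mem_cons_of_mem _ hy))

theorem stepX_map1 (l : List Int) (h : IsBits l) :
    stepX (l.map (fun x => PySem.Int.bxor 1 x)) = stepX l := by
  induction l with
  | nil => rfl
  | cons a t ih =>
    cases t with
    | nil => rfl
    | cons b t' =>
      simp only [List.map_cons, stepX]
      congr 1
      · rcases h a (by simp) with ha | ha <;> rcases h b (by simp) with hb | hb <;>
          subst ha <;> subst hb <;> decide
      · exact ih (fun y hy => h y (List.mem_cons_of_mem _ hy))

theorem powX_map1 (m : Nat) (l : List Int) (h : IsBits l) :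
    powX (m + 1) (l.map (fun x => PySem.Int.bxor 1 x)) = powX (m + 1) l := by
  show powX m (stepX _) = powX m (stepX l)
  rw [stepX_map1 l h]

theorem powX_length (m : Nat) (l : List Int) : (powX m l).length = l.length - m := by
  induction m generalizing l with
  | zero => rfl
  | succ m ih => show (powX m (stepX l)).length = _; rw [ih, stepX_length]; omega

theorem powN_succ_eq (m : Nat) (l : List Int) (h : IsBits l) :
    powN (m + 1) l = (powX (m + 1) l).map (fun x => PySem.Int.bxor 1 x) := by
  induction m generalizing l with
  | zero => exact stepN_eq_mapX l h
  | succ m ih =>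
    show powN (m + 1) (stepN l) = _
    rw [ih (stepN l) (stepN_isBits l h), stepN_eq_mapX l h, powX_map1 m (stepX l) (stepX_isBits l h)]
    rfl

theorem dotI_isBit (row : List Int) : ∀ (l : List Int), IsBits row → IsBits l → IsBit (dotI row l) := by
  induction row with
  | nil => intro l _ _; exact Or.inl rfl
  | cons r rs ih =>
    intro l hr hl
    cases l with
    | nil => exact Or.inl rfl
    | cons x xs =>
      have hd := ih xs (fun y hy => hr y (List.mem_cons_of_mem _ hy))
        (fun y hy => hl y (List.mem_cons_of_mem _ hy))
      show IsBit (PySem.Int.bxor (PySem.Int.band r x) (dotI rs xs))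
      rcases hr r (by simp) with h1 | h1 <;> rcases hl x (by simp) with h2 | h2 <;>
        rcases hd with h3 | h3 <;> subst h1 <;> subst h2 <;> rw [h3] <;>
        first | exact Or.inl (by decide) | exact Or.inr (by decide)

theorem dotB_eq (row l : List Int) (a : Int) (hr : IsBits row) (hl : IsBits l) (ha : IsBit a) :
    (row.zip l).foldl (fun b rx => PySem.Int.bxor b (PySem.Int.band rx.1 rx.2)) a
      = PySem.Int.bxor a (dotI row l) := by
  induction row generalizing l a with
  | nil => simp [dotI, PySem.Int.bxor_zero]
  | cons r rs ih =>
    cases l with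
    | nil => simp [dotI, PySem.Int.bxor_zero]
    | cons x xs =>
      simp only [List.zip_cons_cons, List.foldl_cons, dotI]
      have hrs : IsBits rs := fun y hy => hr y (List.mem_cons_of_mem _ hy)
      have hxs : IsBits xs := fun y hy => hl y (List.mem_cons_of_mem _ hy)
      have hb : IsBit (PySem.Int.band r x) := by
        rcases hr r (by simp) with h1 | h1 <;> rcases hl x (by simp) with h2 | h2 <;>
          subst h1 <;> subst h2 <;> first | exact Or.inl (by decide) | exact Or.inr (by decide)
      have ha2 : IsBit (PySem.Int.bxor a (PySem.Int.band r x)) := by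
        rcases ha with h1 | h1 <;> rcases hb with h2 | h2 <;> subst h1 <;> rw [h2] <;>
          first | exact Or.inl (by decide) | exact Or.inr (by decide)
      rw [ih xs _ hrs hxs ha2]
      have hd := dotI_isBit rs xs hrs hxs
      rcases ha with h1 | h1 <;> rcases hb with h2 | h2 <;> rcases hd with h3 | h3 <;>
        subst h1 <;> rw [h2, h3] <;> decide

theorem nxt'_isBits (p : Int) (row : List Int) (hp : IsBit p) (hr : IsBits row) :
    IsBits (nxt' p row) := by
  induction row generalizing p with
  | nil =>
    intro x hx
    rcases List.mem_cons.1 hx with hx | hx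
    · exact hx ▸ hp
    · simp at hx
  | cons r rs ih =>
    intro x hx
    rcases List.mem_cons.1 hx with hx | hx
    · subst hx
      rcases hp with h1 | h1 <;> rcases hr r (by simp) with h2 | h2 <;> subst h1 <;> subst h2 <;>
        first | exact Or.inl (by decide) | exact Or.inr (by decide)
    · exact ih r (hr r (by simp)) (fun y hy => hr y (List.mem_cons_of_mem _ hy)) x hx

theorem prow_isBits (m : Nat) : IsBits (prow m) := by
  induction m with
  | zero =>
    intro x hx
    rcases List.mem_cons.1 hx with hx | hx
    · exact Or.inr hx
    · simp at hx
  | succ m ih => exact nxt'_isBits 0 (prow m) (Or.inl rfl) ih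

theorem nxt'_length (p : Int) (row : List Int) : (nxt' p row).length = row.length + 1 := by
  induction row generalizing p with
  | nil => rfl
  | cons r rs ih => simp [nxt', ih]

theorem prow_length (m : Nat) : (prow m).length = m + 1 := by
  induction m with
  | zero => rfl
  | succ m ih => show (nxt' 0 (prow m)).length = _; rw [nxt'_length, ih]

theorem nxt'_map (p : Int) (row : List Int) :
    ((p :: row).zip (row ++ [0])).map (fun q => PySem.Int.bxor q.1 q.2) = nxt' p row := by
  induction row generalizing p with
  | nil => simp [nxt', PySem.Int.bxor_zero]
  | cons r rs ih => simp only [List.cons_append, List.zip_cons_cons, List.map_cons, nxt']; rw [ih]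

theorem dot_nxt' (row : List Int) (p : Int) (l : List Int) (hr : IsBits row) (hp : IsBit p)
    (hl : IsBits l) (hlen : row.length < l.length) :
    dotI (nxt' p row) l = PySem.Int.bxor (PySem.Int.band p (l.headD 0)) (dotI row (stepX l)) := by
  induction row generalizing p l with
  | nil =>
    cases l with
    | nil => simp at hlen
    | cons x xs => simp [nxt', dotI, PySem.Int.bxor_zero]
  | cons r rs ih =>
    match l, hlen with
    | x :: y :: xs, hlen =>
      have hrs : IsBits rs := fun z hz => hr z (List.mem_cons_of_mem _ hz)
      have hyxs : IsBits (y :: xs) := fun z hz => hl z (List.mem_cons_of_mem _ hz)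
      have hlen2 : rs.length < (y :: xs).length := by
        simp at hlen ⊢; omega
      simp only [nxt', dotI, stepX, List.headD_cons]
      rw [ih r (y :: xs) hrs (hr r (by simp)) hyxs hlen2]
      simp only [List.headD_cons]
      have hd := dotI_isBit rs (stepX (y :: xs)) hrs (stepX_isBits _ hyxs)
      rcases hp with h1 | h1 <;> rcases hr r (by simp) with h2 | h2 <;>
        rcases hl x (by simp) with h3 | h3 <;> rcases hyxs y (by simp) with h4 | h4 <;>
        rcases hd with h5 | h5 <;>
        subst h1 <;> subst h2 <;> subst h3 <;> subst h4 <;> rw [h5] <;> decide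

theorem headX_dot (m : Nat) (l : List Int) (hl : IsBits l) (hm : m < l.length) :
    (powX m l).headD 0 = dotI (prow m) l := by
  induction m generalizing l with
  | zero =>
    cases l with
    | nil => simp at hm
    | cons x xs =>
      show x = dotI [1] (x :: xs)
      rcases hl x (by simp) with h | h <;> subst h <;> simp [dotI]
  | succ m ih =>
    show (powX m (stepX l)).headD 0 = dotI (nxt' 0 (prow m)) l
    rw [dot_nxt' (prow m) 0 l (prow_isBits m) (Or.inl rfl) hl (by rw [prow_length]; omega)]
    rw [ih (stepX l) (stepX_isBits l hl) (by rw [stepX_length]; omega)]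
    have hd := dotI_isBit (prow m) (stepX l) (prow_isBits m) (stepX_isBits l hl)
    have hh : PySem.Int.band 0 (l.headD 0) = 0 := by
      rw [PySem.Int.band_comm, PySem.Int.band_zero]
    rw [hh]
    rcases hd with h | h <;> rw [h] <;> decide

-- heads of the A triangle built from a bit level
theorem triA (f : Nat) : ∀ (bits : List Int), IsBits bits → bits ≠ [] →
    bits.length ≤ f + 1 →
    (buildTriangleA f (bits.map bitChar)).filterMap List.head?
      = (List.range bits.length).map (fun m => bitChar ((powN m bits).headD 0)) := by
  induction f with
  | zero =>
    intro bits h hne hf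
    match bits, hne, hf with
    | [x], _, _ => rfl
  | succ f ih =>
    intro bits h hne hf
    match bits, hne with
    | x :: bt, _ =>
      by_cases hlen : (x :: bt).length > 1
      · have hmap : ((x :: bt).map bitChar).length > 1 := by simpa using hlen
        rw [show buildTriangleA (f + 1) ((x :: bt).map bitChar)
              = (x :: bt).map bitChar :: buildTriangleA f (newLevelA ((x :: bt).map bitChar)) from by
            rw [buildTriangleA, if_pos hmap]]
        rw [newLevelA_eq, buildL1_map_bitChar _ h]
        have hsb : IsBits (stepN (x :: bt)) := stepN_isBits _ h
        have hsne : stepN (x :: bt) ≠ [] := by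
          have := stepN_length (x :: bt)
          intro hc; rw [hc] at this; simp at this hlen; omega
        have hsf : (stepN (x :: bt)).length ≤ f + 1 := by
          rw [stepN_length]; simp at hf ⊢; omega
        rw [List.filterMap_cons]
        simp only [List.map_cons, List.head?_cons]
        rw [ih (stepN (x :: bt)) hsb hsne hsf]
        have hr : (x :: bt).length = (stepN (x :: bt)).length + 1 := by
          rw [stepN_length, List.length_cons]; omega
        rw [hr, List.range_succ_eq_map, List.map_cons, List.map_map]
        rfl
      · have h1 : bt = [] := by simp at hlen; simpa using hlen
        subst h1
        rfl

theorem loopB (l1 : List Int) (hl1 : IsBits l1) :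
    ∀ (cnt j : Nat) (out : List Char),
    (PySem.List.pyRange ((j + 1 : Nat) : Int) (((j + 1 : Nat) : Int) + (cnt : Int)) 1).foldl
        (bStep l1) (out, prow j)
      = (out ++ (List.range cnt).flatMap
            (fun i => (PySem.Int.toStr (bitOf l1 (j + 1 + i))).toList), prow (j + cnt)) := by
  intro cnt
  induction cnt with
  | zero =>
    intro j out
    rw [show (((j + 1 : Nat) : Int) + ((0 : Nat) : Int)) = ((j + 1 : Nat) : Int) by push_cast; ring]
    rw [PySem.List.pyRange_one_eq_nil (le_refl _)]
    simp
  | succ cnt ih =>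
    intro j out
    rw [PySem.List.pyRange_one_cons (by push_cast; omega)]
    rw [List.foldl_cons]
    have hstep : bStep l1 (out, prow j) ((j + 1 : Nat) : Int)
        = (out ++ (PySem.Int.toStr (bitOf l1 (j + 1))).toList, prow (j + 1)) := by
      show (out ++ (PySem.Int.toStr (if 2 ≤ ((j + 1 : Nat) : Int)
              then PySem.Int.bxor (((prow j).zip l1).foldl
                (fun b rx => PySem.Int.bxor b (PySem.Int.band rx.1 rx.2)) 0) 1
              else ((prow j).zip l1).foldl
                (fun b rx => PySem.Int.bxor b (PySem.Int.band rx.1 rx.2)) 0)).toList,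
            ((0 :: prow j).zip (prow j ++ [0])).map (fun p => PySem.Int.bxor p.1 p.2))
          = (out ++ (PySem.Int.toStr (bitOf l1 (j + 1))).toList, prow (j + 1))
      have h0 : ∀ x : Int, PySem.Int.bxor 0 x = x := fun x => by
        rw [PySem.Int.bxor_comm, PySem.Int.bxor_zero]
      rw [dotB_eq (prow j) l1 0 (prow_isBits j) hl1 (Or.inl rfl), h0, nxt'_map]
      have hif : (if 2 ≤ ((j + 1 : Nat) : Int)
            then PySem.Int.bxor (dotI (prow j) l1) 1 else dotI (prow j) l1)
          = bitOf l1 (j + 1) := by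
        unfold bitOf
        by_cases hj : 1 ≤ j
        · rw [if_pos (by push_cast; omega), if_pos (by omega)]
          simp
        · rw [if_neg (by push_cast; omega), if_neg (by omega)]
          simp
      rw [hif]
      rfl
    rw [hstep]
    have hb : ((j + 1 : Nat) : Int) + 1 = ((j + 1 + 1 : Nat) : Int) := by push_cast; ring
    have hb2 : ((j + 1 : Nat) : Int) + ((cnt + 1 : Nat) : Int)
        = ((j + 1 + 1 : Nat) : Int) + ((cnt : Nat) : Int) := by push_cast; ring
    rw [hb, hb2, ih (j + 1) (out ++ (PySem.Int.toStr (bitOf l1 (j + 1))).toList)]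
    refine Prod.ext ?_ ?_
    · simp only [List.range_succ_eq_map, List.flatMap_cons, List.flatMap_map,
        List.append_assoc, Nat.add_zero, Nat.succ_eq_add_one]
      refine congrArg (out ++ ·) ?_
      refine congrArg ((PySem.Int.toStr (bitOf l1 (j + 1))).toList ++ ·) ?_
      refine List.flatMap_congr ?_
      intro a _
      rw [show j + 1 + 1 + a = j + 1 + (a + 1) from by omega]
    · show prow (j + 1 + cnt) = prow (j + (cnt + 1))
      rw [show j + 1 + cnt = j + (cnt + 1) from by omega]

theorem powN_isBits (m : Nat) (l : List Int) (h : IsBits l) : IsBits (powN m l) := by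
  induction m generalizing l with
  | zero => exact h
  | succ m ih => exact ih _ (stepN_isBits l h)

theorem headD_isBit (l : List Int) (h : IsBits l) : IsBit (l.headD 0) := by
  cases l with
  | nil => exact Or.inl rfl
  | cons x xs => exact h x (by simp)

theorem bitOf_eq_head (l1 : List Int) (hl1 : IsBits l1) (m : Nat) (hm : m < l1.length) :
    bitOf l1 (m + 1) = (powN m l1).headD 0 := by
  cases m with
  | zero =>
    unfold bitOf
    rw [if_neg (by omega)]
    show dotI [1] l1 = l1.headD 0
    cases l1 with
    | nil => simp at hm
    | cons x xs =>
      rcases hl1 x (by simp) with h | h <;> subst h <;> simp [dotI]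
  | succ i =>
    unfold bitOf
    rw [if_pos (by omega)]
    show PySem.Int.bxor (dotI (prow (i + 1)) l1) 1 = (powN (i + 1) l1).headD 0
    rw [← headX_dot (i + 1) l1 hl1 hm, powN_succ_eq i l1 hl1]
    have hne : powX (i + 1) l1 ≠ [] := by
      have hlen := powX_length (i + 1) l1
      intro hc; rw [hc] at hlen; simp at hlen; omega
    cases hp : powX (i + 1) l1 with
    | nil => exact absurd hp hne
    | cons y ys =>
      simp only [List.map_cons, List.headD_cons]
      rw [PySem.Int.bxor_comm]

theorem loopB0 (l1 : List Int) (hl1 : IsBits l1) (cnt : Nat) (c : Char) :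
    ((PySem.List.pyRange 1 ((1 : Int) + (cnt : Int)) 1).foldl (bStep l1) ([c], [1])).1
      = [c] ++ (List.range cnt).flatMap (fun i => (PySem.Int.toStr (bitOf l1 (1 + i))).toList) := by
  exact congrArg Prod.fst (loopB l1 hl1 cnt 0 [c])

theorem flatMap_toStr (l1 : List Int) (hl1 : IsBits l1) :
    ∀ (L : List Nat), (∀ m ∈ L, m < l1.length) →
    L.flatMap (fun m => (PySem.Int.toStr (bitOf l1 (1 + m))).toList)
      = L.map (fun m => bitChar ((powN m l1).headD 0)) := by
  intro L
  induction L with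
  | nil => intro _; rfl
  | cons m L ih =>
    intro hL
    rw [List.flatMap_cons, List.map_cons, ih (fun x hx => hL x (List.mem_cons_of_mem _ hx))]
    rw [show 1 + m = m + 1 from by omega]
    rw [bitOf_eq_head l1 hl1 m (hL m (by simp))]
    rw [toStr_bit _ (headD_isBit _ (powN_isBits m l1 hl1))]
    rfl

-- ===== VERDICT (by name: the statement is the Claim_ definition above) =====
theorem triangular_encrypt_spec : Claim_equal_triangular_encrypt := by
  unfold Claim_equal_triangular_encrypt
  intro s _ _
  unfold Spec_triangular_encrypt triangular_encrypt triangular_encrypt_alt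
  cases hs : s.toList with
  | nil => rfl
  | cons c rest =>
    cases rest with
    | nil => rfl
    | cons d t =>
      have hmap : (c :: d :: t).length > 1 := by simp
      rw [show buildTriangleA (c :: d :: t).length (c :: d :: t)
            = (c :: d :: t) :: buildTriangleA (t.length + 1) (newLevelA (c :: d :: t)) from by
          rw [show (c :: d :: t).length = (t.length + 1) + 1 from by simp, buildTriangleA,
            if_pos hmap]]
      rw [List.filterMap_cons]
      simp only [List.head?_cons]
      rw [newLevelA_eq]
      have hbits := buildL1_isBits (c :: d :: t)
      have hlen : (buildL1 (c :: d :: t)).length = t.length + 1 := by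
        rw [buildL1_length]; simp
      have hne : buildL1 (c :: d :: t) ≠ [] := by
        intro hc; rw [hc] at hlen; simp at hlen
      rw [triA (t.length + 1) (buildL1 (c :: d :: t)) hbits hne (by omega)]
      rw [show ((c :: d :: t).length : Int)
            = (1 : Int) + ((t.length + 1 : Nat) : Int) from by push_cast [List.length_cons]; ring]
      rw [loopB0 (buildL1 (c :: d :: t)) hbits (t.length + 1) c]
      rw [flatMap_toStr (buildL1 (c :: d :: t)) hbits (List.range (t.length + 1))
        (fun m hm => by rw [hlen]; exact List.mem_range.1 hm)]
      rw [hlen]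
      rfl
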